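-- pv_equiv track=rewrite | github.com/greatertomi/Codility-Practices | Solutions/Sieve of Eratosthenes/CountSemiprimes.py | findSemiPrimes
-- ===== SOURCE A (Python) =====
-- def findSemiPrimes(num1, num2):
--     prime_nums = []
--     semi_primes = []
--     for i in range(1, (num2//2) + 1):
--         if isPrime(i):
--             prime_nums.append(i)
--
--     for m in prime_nums:
--         for n in prime_nums:
--             prod = m*n
--             if prod not in semi_primes and (num1 <= prod <= num2):
--                 semi_primes.append(prod)
--
--     semi_primes.sort()
--     return semi_primes
--
-- def isPrime(num):
--     if num <= 1:
--         return False
--     if num == 2: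
--         return True
--
--     primeStatus = True
--     for i in range(2, (num//2) + 1):
--         if num % i == 0:
--             primeStatus = False
--             break
--     return primeStatus
-- ===== SOURCE B (Python) =====
-- def findSemiPrimes(num1, num2):
--     # Scan [max(num1,4), num2] once; test each k directly for being a semiprime
--     # via its smallest divisor, instead of building a prime list and all products.
--     res = []
--     for k in range(max(num1, 4), num2 + 1):
--         d = 2
--         while d * d <= k and k % d != 0:
--             d += 1
--         if d * d <= k:
--             m = k // d
--             e = 2
--             while e * e <= m and m % e != 0:
--                 e += 1
--             if e * e > m:
--                 res.append(k)
--     return res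
-- ===== Notes on version B (the rewrite author's own statement) =====
-- stated objective: faster
-- what changed: Instead of trial-division-building a prime list up to num2//2 and enumerating all prime pairs with a linear 'not in' dedup scan plus a final sort, B scans [max(num1,4), num2] once in order and tests each k for semiprimality via its smallest divisor, so the output is produced already sorted and duplicate-free.
import Mathlib
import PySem

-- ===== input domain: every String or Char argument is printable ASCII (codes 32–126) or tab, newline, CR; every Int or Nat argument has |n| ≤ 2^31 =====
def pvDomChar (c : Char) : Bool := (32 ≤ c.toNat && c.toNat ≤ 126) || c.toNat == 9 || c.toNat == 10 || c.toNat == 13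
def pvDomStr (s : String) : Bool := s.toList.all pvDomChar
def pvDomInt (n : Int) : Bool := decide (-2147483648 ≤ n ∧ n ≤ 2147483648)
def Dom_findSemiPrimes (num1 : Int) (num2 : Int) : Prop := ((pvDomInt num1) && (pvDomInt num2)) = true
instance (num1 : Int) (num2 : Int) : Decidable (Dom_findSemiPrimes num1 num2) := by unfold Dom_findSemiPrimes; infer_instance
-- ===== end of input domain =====

-- B replaces A's prime-list + all-pairs products + linear 'not in' dedup + final sort with a
-- single in-order scan of [max(num1,4), num2] testing each k for semiprimality by smallest divisor.
-- (A's semi_primes.sort() mutates only a local list; the return values are what is compared.)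

-- ===== PORT A =====
-- 'for i in range(2, num//2+1): if num % i == 0: primeStatus = False; break' — loop with break as structural recursion
def isPrimeLoop (num : Int) : List Int → Bool
  | [] => true
  | i :: rest => if PySem.Int.mod num i = 0 then false else isPrimeLoop num rest

def isPrime (num : Int) : Bool :=
  if num ≤ 1 then false
  else if num = 2 then true
  else isPrimeLoop num (PySem.List.pyRange 2 (PySem.Int.floordiv num 2 + 1) 1)

def findSemiPrimes (num1 : Int) (num2 : Int) : List Int :=
  let prime_nums := (PySem.List.pyRange 1 (PySem.Int.floordiv num2 2 + 1) 1).foldl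
    (fun acc i => if isPrime i then acc ++ [i] else acc) []
  let semi_primes := prime_nums.foldl (fun acc m =>
    prime_nums.foldl (fun acc n =>
      let prod := m * n
      if prod ∉ acc ∧ num1 ≤ prod ∧ prod ≤ num2 then acc ++ [prod] else acc) acc) []
  PySem.List.sorted semi_primes (fun x => x) false

-- ===== PORT B =====
-- 'd = 2; while d*d <= k and k % d != 0: d += 1' — the while loop as a structural recursion
-- on a fuel bound; the fuel (k+1-d trips, each trip raises d by 1 and runs only while d*d ≤ k,
-- hence d ≤ k) only makes the same computation total and is proved never to run out
def smallestDivAux (k : Int) : Nat → Int → Int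
  | 0, d => d
  | fuel + 1, d => if d * d ≤ k ∧ ¬ PySem.Int.mod k d = 0 then smallestDivAux k fuel (d + 1) else d

def smallestDiv (k : Int) (d : Int) : Int := smallestDivAux k (k + 1 - d).toNat d

def findSemiPrimes_alt (num1 : Int) (num2 : Int) : List Int :=
  (PySem.List.pyRange (max num1 4) (num2 + 1) 1).foldl (fun res k =>
    let d := smallestDiv k 2
    if d * d ≤ k then
      let m := PySem.Int.floordiv k d
      let e := smallestDiv m 2
      if e * e > m then res ++ [k] else res
    else res) []

-- ===== PRECONDITION & SPEC =====
def Spec_findSemiPrimes (num1 : Int) (num2 : Int) (out : List Int) : Prop := out = findSemiPrimes_alt num1 num2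
instance (num1 : Int) (num2 : Int) (out : List Int) : Decidable (Spec_findSemiPrimes num1 num2 out) := by unfold Spec_findSemiPrimes; infer_instance

-- ===== CLAIM (what is proved, stated in full; the proofs are below) =====
def Claim_equal_findSemiPrimes : Prop := ∀ (num1 : Int) (num2 : Int), Dom_findSemiPrimes num1 num2 → Spec_findSemiPrimes num1 num2 (findSemiPrimes num1 num2)

-- ===== LEMMAS AND PROOFS =====

-- mathematical primality over Int, matched by both programs' tests
def IsPr (p : Int) : Prop := 2 ≤ p ∧ ∀ d : Int, 1 < d → d < p → ¬ d ∣ p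

lemma isPrimeLoop_iff (num : Int) (l : List Int) :
    isPrimeLoop num l = true ↔ ∀ i ∈ l, ¬ i ∣ num := by
  induction l with
  | nil => simp [isPrimeLoop]
  | cons i rest ih =>
    by_cases h : PySem.Int.mod num i = 0
    · simp only [isPrimeLoop, h, if_true]
      constructor
      · intro hf; exact absurd hf (by simp)
      · intro hall
        exact absurd ((PySem.Int.mod_eq_zero_iff_dvd num i).1 h) (hall i (by simp))
    · simp only [isPrimeLoop, h, if_false, ih, List.mem_cons]
      constructor
      · rintro hall j (rfl | hj)
        · exact fun hd => h ((PySem.Int.mod_eq_zero_iff_dvd num j).2 hd)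
        · exact hall j hj
      · intro hall j hj; exact hall j (Or.inr hj)

lemma isPrime_iff (num : Int) : isPrime num = true ↔ IsPr num := by
  unfold isPrime
  by_cases h1 : num ≤ 1
  · simp only [h1, if_true, IsPr]
    constructor
    · intro hf; exact absurd hf (by simp)
    · rintro ⟨h, _⟩; omega
  · by_cases h2 : num = 2
    · subst h2
      simp only [h1, if_false, if_true, IsPr]
      constructor
      · intro _; exact ⟨le_refl _, fun d hd1 hd2 => by omega⟩
      · intro _; trivial
    · simp only [h1, h2, if_false, isPrimeLoop_iff]
      constructor
      · intro hall
        refine ⟨by omega, fun d hd1 hd2 hdvd => ?_⟩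
        rcases hdvd with ⟨c, hc⟩
        have hc2 : 2 ≤ c := by nlinarith
        have hcd : c ∣ num := ⟨d, by linarith [hc]⟩
        have hcle : c ≤ PySem.Int.floordiv num 2 := by
          rw [PySem.Int.le_floordiv_iff_mul_le (by omega)]
          nlinarith
        exact hall c (by rw [PySem.List.mem_pyRange_one]; omega) hcd
      · rintro ⟨h2n, hnd⟩ i hi hdvd
        rw [PySem.List.mem_pyRange_one] at hi
        have hfd : PySem.Int.floordiv num 2 < num := by
          have := (PySem.Int.floordiv_lt_iff_lt_mul (a := num) (b := 2) (q := num) (by omega)).2 (by omega)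
          omega
        exact hnd i (by omega) (by omega) hdvd

lemma le_sq_self (d : Int) : d ≤ d * d := by nlinarith [sq_nonneg d, sq_nonneg (d - 1)]

lemma smallestDivAux_spec (k : Int) (fuel : Nat) :
    ∀ d : Int, (k + 1 - d).toNat ≤ fuel →
    d ≤ smallestDivAux k fuel d ∧
    (¬ (smallestDivAux k fuel d * smallestDivAux k fuel d ≤ k) ∨ smallestDivAux k fuel d ∣ k) ∧
    (∀ e, d ≤ e → e < smallestDivAux k fuel d → e * e ≤ k ∧ ¬ e ∣ k) := by
  induction fuel with
  | zero =>
    intro d hf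
    simp only [smallestDivAux]
    refine ⟨le_refl _, Or.inl (fun hsq => ?_), fun e he1 he2 => by omega⟩
    have := le_sq_self d
    omega
  | succ fuel ih =>
    intro d hf
    simp only [smallestDivAux]
    split_ifs with hg
    · have hdk : d ≤ k := le_trans (le_sq_self d) hg.1
      obtain ⟨hle, hstop, hall⟩ := ih (d + 1) (by omega)
      refine ⟨by omega, hstop, fun e he1 he2 => ?_⟩
      rcases eq_or_lt_of_le he1 with heq | hlt
      · subst heq
        exact ⟨hg.1, fun hd => hg.2 ((PySem.Int.mod_eq_zero_iff_dvd k d).2 hd)⟩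
      · exact hall e (by omega) he2
    · push Not at hg
      refine ⟨le_refl _, ?_, fun e he1 he2 => by omega⟩
      by_cases hk : d * d ≤ k
      · exact Or.inr ((PySem.Int.mod_eq_zero_iff_dvd k d).1 (hg hk))
      · exact Or.inl hk

lemma smallestDiv_spec (k d : Int) :
    d ≤ smallestDiv k d ∧
    (¬ (smallestDiv k d * smallestDiv k d ≤ k) ∨ smallestDiv k d ∣ k) ∧
    (∀ e, d ≤ e → e < smallestDiv k d → e * e ≤ k ∧ ¬ e ∣ k) :=
  smallestDivAux_spec k _ d (le_refl _)

lemma IsPr_prime {p : Int} (h : IsPr p) : Prime p := by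
  obtain ⟨h2, hnd⟩ := h
  rw [Int.prime_iff_natAbs_prime]
  rw [Nat.prime_def_lt]
  constructor
  · omega
  · intro m hm hdvd
    by_contra hm1
    have hm2 : 2 ≤ m := by
      rcases Nat.lt_or_ge m 2 with hlt | hge
      · interval_cases m
        · simp at hdvd; omega
        · exact absurd rfl hm1
      · exact hge
    have : (m : Int) ∣ p := by
      have := Int.natCast_dvd_natCast.2 hdvd
      rwa [Int.natAbs_of_nonneg (by omega)] at this
    exact hnd m (by exact_mod_cast hm2) (by omega) this

lemma prime_of_no_small_div {m : Int} (hm : 2 ≤ m)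
    (h : ∀ f : Int, 2 ≤ f → f * f ≤ m → ¬ f ∣ m) : IsPr m := by
  refine ⟨hm, fun f hf1 hf2 hdvd => ?_⟩
  by_cases hsq : f * f ≤ m
  · exact h f (by omega) hsq hdvd
  · rcases hdvd with ⟨c, hc⟩
    have hc1 : 1 ≤ c := by nlinarith
    have hc2 : 2 ≤ c := by
      rcases eq_or_lt_of_le hc1 with heq | hlt
      · exfalso; rw [← heq] at hc; omega
      · omega
    have hcf : c < f := by nlinarith
    exact h c hc2 (by nlinarith) ⟨f, by linarith [hc, mul_comm f c]⟩

-- B's first while loop, when it stops at a divisor of k ≥ 2, stops at a prime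
lemma smallestDiv_isPr {k : Int} (_hk : 2 ≤ k) (hsq : smallestDiv k 2 * smallestDiv k 2 ≤ k) :
    IsPr (smallestDiv k 2) ∧ smallestDiv k 2 ∣ k := by
  obtain ⟨hle, hstop, hall⟩ := smallestDiv_spec k 2
  have hdvd : smallestDiv k 2 ∣ k := by tauto
  refine ⟨⟨hle, fun e he1 he2 hed => ?_⟩, hdvd⟩
  exact (hall e (by omega) he2).2 (hed.trans hdvd)

-- B's second while loop: e*e > m iff m is prime (for m ≥ 2)
lemma primeTest_iff {m : Int} (hm : 2 ≤ m) :
    m < smallestDiv m 2 * smallestDiv m 2 ↔ IsPr m := by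
  obtain ⟨hle, hstop, hall⟩ := smallestDiv_spec m 2
  constructor
  · intro hgt
    refine prime_of_no_small_div hm (fun f hf1 hfsq hfd => ?_)
    have hfe : f < smallestDiv m 2 := by nlinarith
    exact (hall f hf1 hfe).2 hfd
  · intro hpr
    by_contra hle2
    push_neg at hle2
    have hdvd : smallestDiv m 2 ∣ m := by tauto
    have hlt : smallestDiv m 2 < m := by nlinarith
    exact hpr.2 (smallestDiv m 2) (by omega) hlt hdvd

lemma IsPr_dvd_eq {p d : Int} (hp : IsPr p) (hd2 : 2 ≤ d) (hdvd : d ∣ p) : d = p := by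
  rcases lt_or_ge d p with hlt | hge
  · exact absurd hdvd (hp.2 d (by omega) hlt)
  · have h1 := hp.1
    have := Int.le_of_dvd (by omega) hdvd
    omega

-- B's per-k test is exactly semiprimality
lemma semiTest_iff {k : Int} (hk : 2 ≤ k) :
    (smallestDiv k 2 * smallestDiv k 2 ≤ k ∧
      PySem.Int.floordiv k (smallestDiv k 2) <
        smallestDiv (PySem.Int.floordiv k (smallestDiv k 2)) 2 *
          smallestDiv (PySem.Int.floordiv k (smallestDiv k 2)) 2)
    ↔ ∃ p q : Int, IsPr p ∧ IsPr q ∧ k = p * q := by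
  obtain ⟨hle, hstop, hall⟩ := smallestDiv_spec k 2
  set d := smallestDiv k 2 with hd
  constructor
  · rintro ⟨hsq, hmtest⟩
    obtain ⟨hdpr, hdvd⟩ := smallestDiv_isPr hk hsq
    set m := PySem.Int.floordiv k d with hm
    have hmd : m * d = k := by
      rw [hm, PySem.Int.floordiv_eq_ediv_of_pos (by omega)]
      exact Int.ediv_mul_cancel hdvd
    have hm2 : 2 ≤ m := by nlinarith
    exact ⟨d, m, hdpr, (primeTest_iff hm2).1 hmtest, by linarith [hmd, mul_comm m d]⟩
  · rintro ⟨p, q, hp, hq, rfl⟩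
    have hdp : d ≤ p := by
      by_contra hlt
      exact (hall p hp.1 (by omega)).2 ⟨q, rfl⟩
    have hdq : d ≤ q := by
      by_contra hlt
      exact (hall q hq.1 (by omega)).2 ⟨p, mul_comm p q⟩
    have hsq : d * d ≤ p * q := by
      have h2d : 2 ≤ d := hle
      nlinarith [hp.1, hq.1]
    refine ⟨hsq, ?_⟩
    obtain ⟨hdpr, hdvd⟩ := smallestDiv_isPr hk hsq
    have hmd : PySem.Int.floordiv (p * q) d * d = p * q := by
      rw [PySem.Int.floordiv_eq_ediv_of_pos (by omega)]
      exact Int.ediv_mul_cancel hdvd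
    have hpq : d = p ∨ d = q := by
      rcases (IsPr_prime hdpr).2.2 p q hdvd with h | h
      · exact Or.inl (IsPr_dvd_eq hp hdpr.1 h)
      · exact Or.inr (IsPr_dvd_eq hq hdpr.1 h)
    have hmpr : IsPr (PySem.Int.floordiv (p * q) d) := by
      rcases hpq with heq | heq
      · have : PySem.Int.floordiv (p * q) d = q := by
          apply mul_right_cancel₀ (b := d) (by omega)
          rw [hmd, heq, mul_comm]
        rwa [this]
      · have : PySem.Int.floordiv (p * q) d = p := by
          apply mul_right_cancel₀ (b := d) (by omega)
          rw [hmd, heq]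
        rwa [this]
    exact (primeTest_iff hmpr.1).2 hmpr

-- membership/nodup of A's "if prod not in acc and in-range: acc.append(prod)" dedup fold
lemma mem_dedupFold (P : Int → Prop) [DecidablePred P] (xs acc : List Int) (x : Int) :
    x ∈ xs.foldl (fun a y => if y ∉ a ∧ P y then a ++ [y] else a) acc ↔
      x ∈ acc ∨ (x ∈ xs ∧ P x) := by
  induction xs generalizing acc with
  | nil => simp
  | cons y rest ih =>
    simp only [List.foldl_cons, ih, List.mem_cons]
    split_ifs with h
    · simp only [List.mem_append, List.mem_singleton]
      constructor
      · rintro ((hx | rfl) | hx)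
        · exact Or.inl hx
        · exact Or.inr ⟨Or.inl rfl, h.2⟩
        · exact Or.inr ⟨Or.inr hx.1, hx.2⟩
      · rintro (hx | ⟨(rfl | hx), hP⟩)
        · exact Or.inl (Or.inl hx)
        · exact Or.inl (Or.inr rfl)
        · exact Or.inr ⟨hx, hP⟩
    · constructor
      · rintro (hx | hx)
        · exact Or.inl hx
        · exact Or.inr ⟨Or.inr hx.1, hx.2⟩
      · rintro (hx | ⟨(rfl | hx), hP⟩)
        · exact Or.inl hx
        · by_cases hmem : x ∈ acc
          · exact Or.inl hmem
          · exact absurd ⟨hmem, hP⟩ h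
        · exact Or.inr ⟨hx, hP⟩

lemma nodup_dedupFold (P : Int → Prop) [DecidablePred P] (xs acc : List Int)
    (h : acc.Nodup) :
    (xs.foldl (fun a y => if y ∉ a ∧ P y then a ++ [y] else a) acc).Nodup := by
  induction xs generalizing acc with
  | nil => simpa
  | cons y rest ih =>
    simp only [List.foldl_cons]
    split_ifs with hy
    · exact ih _ ((List.nodup_append).2 ⟨h, List.nodup_singleton y, by simpa using fun a ha (heq : a = y) => hy.1 (heq ▸ ha)⟩)
    · exact ih _ h

-- a fold of folds is a fold over the flattened list
lemma foldl_foldl_eq_foldl_flatMap {α β : Type} (g : α → List α) (s : β → α → β)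
    (l : List α) (init : β) :
    l.foldl (fun acc m => (g m).foldl s acc) init = (l.flatMap g).foldl s init := by
  induction l generalizing init with
  | nil => rfl
  | cons m rest ih => simp [List.foldl_append, ih]

-- ===== VERDICT (by name: the statement is the Claim_ definition above) =====
theorem findSemiPrimes_spec : Claim_equal_findSemiPrimes := by
  intro num1 num2 _
  show findSemiPrimes num1 num2 = findSemiPrimes_alt num1 num2
  unfold findSemiPrimes findSemiPrimes_alt
  simp only []
  set fd2 := PySem.Int.floordiv num2 2 with hfd2
  set L := (PySem.List.pyRange 1 (fd2 + 1) 1).foldl (fun acc i => if isPrime i then acc ++ [i] else acc) [] with hL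
  -- characterize A's prime list
  have hmemL : ∀ i, i ∈ L ↔ IsPr i ∧ i ≤ fd2 := by
    intro i
    rw [hL, PySem.List.foldl_append_if_eq_filter]
    simp only [List.nil_append, List.mem_filter, PySem.List.mem_pyRange_one, isPrime_iff]
    constructor
    · rintro ⟨⟨_, h2⟩, hpr⟩; exact ⟨hpr, by omega⟩
    · rintro ⟨hpr, hle⟩; exact ⟨⟨by have := hpr.1; omega, by omega⟩, hpr⟩
  -- A's double product loop is a dedup-filter fold over the flattened pair products
  have hsemi : (L.foldl (fun acc m => L.foldl (fun acc n =>
        if m * n ∉ acc ∧ num1 ≤ m * n ∧ m * n ≤ num2 then acc ++ [m * n] else acc) acc) []) =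
      ((L.flatMap (fun m => L.map (fun n => m * n))).foldl
        (fun a y => if y ∉ a ∧ (num1 ≤ y ∧ y ≤ num2) then a ++ [y] else a) []) := by
    rw [← foldl_foldl_eq_foldl_flatMap]
    congr 1
    funext acc m
    rw [List.foldl_map]
  rw [hsemi]
  set semi := ((L.flatMap (fun m => L.map (fun n => m * n))).foldl
        (fun a y => if y ∉ a ∧ (num1 ≤ y ∧ y ≤ num2) then a ++ [y] else a) []) with hsemidef
  -- B's loop body is an append-if of a single semiprimality condition
  have hBstep : (fun (res : List Int) (k : Int) =>
        if smallestDiv k 2 * smallestDiv k 2 ≤ k then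
          if PySem.Int.floordiv k (smallestDiv k 2) <
              smallestDiv (PySem.Int.floordiv k (smallestDiv k 2)) 2 *
                smallestDiv (PySem.Int.floordiv k (smallestDiv k 2)) 2 then res ++ [k] else res
        else res) =
      (fun (res : List Int) (k : Int) =>
        if (smallestDiv k 2 * smallestDiv k 2 ≤ k ∧
            PySem.Int.floordiv k (smallestDiv k 2) <
              smallestDiv (PySem.Int.floordiv k (smallestDiv k 2)) 2 *
                smallestDiv (PySem.Int.floordiv k (smallestDiv k 2)) 2) then res ++ [k] else res) := by
    funext res k
    by_cases h1 : smallestDiv k 2 * smallestDiv k 2 ≤ k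
    · by_cases h2 : PySem.Int.floordiv k (smallestDiv k 2) <
          smallestDiv (PySem.Int.floordiv k (smallestDiv k 2)) 2 *
            smallestDiv (PySem.Int.floordiv k (smallestDiv k 2)) 2
      · simp [h1, h2]
      · simp [h1, h2]
    · simp [h1]
  rw [hBstep, PySem.List.foldl_append_ite_eq_filter]
  simp only [List.nil_append]
  set B := (PySem.List.pyRange (max num1 4) (num2 + 1) 1).filter
      (fun k => decide (smallestDiv k 2 * smallestDiv k 2 ≤ k ∧
        PySem.Int.floordiv k (smallestDiv k 2) <
          smallestDiv (PySem.Int.floordiv k (smallestDiv k 2)) 2 *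
            smallestDiv (PySem.Int.floordiv k (smallestDiv k 2)) 2)) with hBdef
  -- B is strictly increasing and duplicate-free
  have hBpw : B.Pairwise (fun a b : Int => a < b) := by
    rw [hBdef]
    exact (PySem.List.pairwise_lt_pyRange_one _ _).filter _
  have hBnd : B.Nodup := hBpw.nodup
  have hSnd : semi.Nodup := nodup_dedupFold _ _ _ List.nodup_nil
  -- same members
  have hmem : ∀ x, x ∈ B ↔ x ∈ semi := by
    intro x
    rw [hBdef, hsemidef, mem_dedupFold]
    simp only [List.mem_filter, PySem.List.mem_pyRange_one, List.mem_flatMap, List.mem_map,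
      List.not_mem_nil, false_or, decide_eq_true_eq, max_le_iff, hmemL]
    constructor
    · rintro ⟨⟨⟨hn1, h4⟩, hlt⟩, hC⟩
      obtain ⟨p, q, hp, hq, rfl⟩ := (semiTest_iff (by omega)).1 hC
      have hp2 := hp.1
      have hq2 := hq.1
      have hple : p ≤ fd2 := by
        rw [hfd2, PySem.Int.le_floordiv_iff_mul_le (by omega)]
        nlinarith
      have hqle : q ≤ fd2 := by
        rw [hfd2, PySem.Int.le_floordiv_iff_mul_le (by omega)]
        nlinarith
      exact ⟨⟨p, ⟨hp, hple⟩, q, ⟨hq, hqle⟩, rfl⟩, hn1, by omega⟩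
    · rintro ⟨⟨p, ⟨hp, hple⟩, q, ⟨hq, hqle⟩, rfl⟩, hn1, hle⟩
      have hp2 := hp.1
      have hq2 := hq.1
      have h4 : 4 ≤ p * q := by nlinarith
      refine ⟨⟨⟨hn1, h4⟩, by omega⟩, (semiTest_iff (by omega)).2 ⟨p, q, hp, hq, rfl⟩⟩
  -- A sorts its dedup list; B is that list already in increasing order
  exact PySem.List.sorted_eq_of_perm_of_pairwise_lt semi B (fun x => x)
    ((List.perm_ext_iff_of_nodup hBnd hSnd).2 hmem) hBpw
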